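-- pv_equiv track=rewrite | github.com/wybh930/DGU_Algorithm_Study | 10 (8.26)/1541.py | minimize_expression
-- ===== SOURCE A (Python) =====
-- def minimize_expression(expression):
--     terms = expression.split('-')
--     total = 0
--
--     for i, term in enumerate(terms):
--         sum_in_term = sum(map(int, term.split('+')))
--         if i == 0:
--             total += sum_in_term
--         else:
--             total -= sum_in_term
--
--     return total
-- ===== SOURCE B (Python) =====
-- def minimize_expression(expression):
--     # Identity: result = firstGroup - (grand - firstGroup) = 2*firstGroup - grand,
--     # where grand is the sum of every number in the expression (all are subtracted
--     # except the first group, which is added). Flatten once with replace, no loop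
--     # over groups and no per-group sign handling.
--     grand = sum(map(int, expression.replace('+', '-').split('-')))
--     first = sum(map(int, expression.split('-')[0].split('+')))
--     return 2 * first - grand
-- ===== Notes on version B (the rewrite author's own statement) =====
-- stated objective: alternative
-- what changed: B evaluates nothing group-by-group: it flattens the whole expression into a single token stream by rewriting '+' as '-', sums every number once into a grand total, and returns 2*firstGroupSum - grandTotal (the first group is the only one added, all others are subtracted), instead of A's enumerate loop with a per-iteration sign branch.
import Mathlib
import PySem

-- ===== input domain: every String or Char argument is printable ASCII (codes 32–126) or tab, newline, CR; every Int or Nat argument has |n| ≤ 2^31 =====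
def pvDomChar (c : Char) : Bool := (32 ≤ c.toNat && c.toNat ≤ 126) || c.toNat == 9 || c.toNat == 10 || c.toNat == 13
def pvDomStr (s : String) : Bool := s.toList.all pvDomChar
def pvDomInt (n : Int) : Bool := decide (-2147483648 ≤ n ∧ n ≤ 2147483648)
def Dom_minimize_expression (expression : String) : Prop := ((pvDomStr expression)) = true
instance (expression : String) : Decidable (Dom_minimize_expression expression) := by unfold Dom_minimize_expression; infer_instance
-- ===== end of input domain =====

-- B replaces A's enumerate loop with the identity result = 2*firstGroup - grandTotal, flattening the
-- whole expression into one token stream with replace('+','-'); objective: alternative (same O(n) cost).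

-- ===== PORT A =====
-- s.split(sep) with the nonempty literal separators used here (split? is some for sep ≠ "")
def pySplit (s sep : String) : List String := (PySem.Str.split? s sep).getD []
-- int(s) under Pre_ (ofStr? is some there)
def pyInt (s : String) : Int := (PySem.Int.ofStr? s).getD 0

def minimize_expression (expression : String) : Int :=
  let terms := pySplit expression "-"
  (PySem.List.enumerate terms).foldl
    (fun total p =>
      let sum_in_term := ((pySplit p.2 "+").map pyInt).sum
      if p.1 == 0 then total + sum_in_term else total - sum_in_term)
    0

-- ===== PORT B =====
def minimize_expression_alt (expression : String) : Int :=
  let grand := ((pySplit (PySem.Str.replace expression "+" "-") "-").map pyInt).sum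
  let first :=
    match pySplit expression "-" with
    | [] => 0   -- unreachable: str.split always yields at least one piece
    | h :: _ => ((pySplit h "+").map pyInt).sum
  2 * first - grand

-- ===== PRECONDITION & SPEC =====
-- Pre_ excludes exactly the inputs on which Python's int() raises ValueError (some token between the
-- minus/plus separators is not an int literal); both A and B raise there.
def Pre_minimize_expression (expression : String) : Prop :=
  ∀ t ∈ PySem.Chars.splitOn expression.toList ['-'], ∀ n ∈ PySem.Chars.splitOn t ['+'],
    (PySem.Int.ofChars? n).isSome = true
instance (expression : String) : Decidable (Pre_minimize_expression expression) := by
  unfold Pre_minimize_expression; infer_instance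

def pvWitness_minimize_expression : String := "10+20+30-40-50+60"

def Spec_minimize_expression (expression : String) (out : Int) : Prop := out = minimize_expression_alt expression
instance (expression : String) (out : Int) : Decidable (Spec_minimize_expression expression out) := by unfold Spec_minimize_expression; infer_instance

-- ===== CLAIM (what is proved, stated in full; the proofs are below) =====
def Claim_equal_minimize_expression : Prop := ∀ (expression : String), Dom_minimize_expression expression → Pre_minimize_expression expression → Spec_minimize_expression expression (minimize_expression expression)

-- ===== LEMMAS AND PROOFS =====

-- '+' ↦ '-', every other character kept: what replace('+','-') does pointwise
def repl (c : Char) : Char := if c = '+' then '-' else c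

-- structural form of str.split on a one-character separator (cur = current piece, reversed)
def mySplit (c : Char) : List Char → List Char → List (List Char)
  | [], cur => [cur.reverse]
  | d :: rest, cur => if d = c then cur.reverse :: mySplit c rest [] else mySplit c rest (d :: cur)

lemma replace_go_eq : ∀ (l : List Char) (fuel : Nat) (acc : List Char), l.length ≤ fuel →
    PySem.Chars.replace.go ['+'] ['-'] fuel l acc = acc.reverse ++ l.map repl := by
  intro l
  induction l with
  | nil =>
    intro fuel acc _
    cases fuel <;> simp [PySem.Chars.replace.go]
  | cons c rest ih =>
    intro fuel acc h
    cases fuel with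
    | zero => simp at h
    | succ f =>
      simp only [PySem.Chars.replace.go]
      by_cases hc : c = '+'
      · subst hc
        simp [List.isPrefixOf, ih f _ (by simpa using h), repl]
      · simp [List.isPrefixOf, Ne.symm hc, hc, ih f _ (by simpa using h), repl]

lemma replace_eq_map (l : List Char) : PySem.Chars.replace l ['+'] ['-'] = l.map repl := by
  simp [PySem.Chars.replace, replace_go_eq l l.length [] le_rfl]

lemma splitOn_go_eq : ∀ (l : List Char) (c : Char) (fuel : Nat) (cur : List Char) (acc : List (List Char)),
    l.length ≤ fuel →
    PySem.Chars.splitOn.go [c] fuel l cur acc = acc.reverse ++ mySplit c l cur := by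
  intro l
  induction l with
  | nil =>
    intro c fuel cur acc _
    cases fuel <;> simp [PySem.Chars.splitOn.go, mySplit]
  | cons d rest ih =>
    intro c fuel cur acc h
    cases fuel with
    | zero => simp at h
    | succ f =>
      simp only [PySem.Chars.splitOn.go]
      by_cases hd : d = c
      · subst hd
        simp [List.isPrefixOf, ih d f [] _ (by simpa using h), mySplit]
      · simp [List.isPrefixOf, Ne.symm hd, hd, ih c f _ _ (by simpa using h), mySplit]

lemma splitOn_eq (l : List Char) (c : Char) : PySem.Chars.splitOn l [c] = mySplit c l [] := by
  simp [PySem.Chars.splitOn, splitOn_go_eq l c (l.length + 1) [] [] (by omega)]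

lemma mySplit_ne_nil (c : Char) (l cur : List Char) : mySplit c l cur ≠ [] := by
  induction l generalizing cur with
  | nil => simp [mySplit]
  | cons d rest ih =>
    simp only [mySplit]
    split_ifs <;> simp [ih]

-- a piece without the separator is returned whole
lemma mySplit_no_sep (c : Char) : ∀ (t cur : List Char), c ∉ t → mySplit c t cur = [cur.reverse ++ t] := by
  intro t
  induction t with
  | nil => intro cur _; simp [mySplit]
  | cons d rest ih =>
    intro cur h
    have hd : d ≠ c := fun hdc => h (by simp [hdc])
    have hr : c ∉ rest := fun hm => h (by simp [hm])
    simp [mySplit, hd, ih (d :: cur) hr]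

-- splitting a ++ c :: b peels off a when a is separator-free
lemma mySplit_sep_mid (c : Char) : ∀ (a b cur : List Char), c ∉ a →
    mySplit c (a ++ c :: b) cur = (cur.reverse ++ a) :: mySplit c b [] := by
  intro a
  induction a with
  | nil => intro b cur _; simp [mySplit]
  | cons d rest ih =>
    intro b cur h
    have hd : d ≠ c := fun hdc => h (by simp [hdc])
    have hr : c ∉ rest := fun hm => h (by simp [hm])
    simp [mySplit, hd, ih b (d :: cur) hr]

-- the current '-'-group as forward text: the finished '+'-pieces (each followed by '+') then cur reversed
def jfwd (done : List (List Char)) (cur : List Char) : List Char :=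
  (done.flatMap (fun t => t ++ ['+'])) ++ cur.reverse

lemma mySplit_plus_jfwd : ∀ (done : List (List Char)) (cur : List Char), '+' ∉ cur →
    (∀ t ∈ done, '+' ∉ t) → mySplit '+' (jfwd done cur) [] = done ++ [cur.reverse] := by
  intro done
  induction done with
  | nil =>
    intro cur hcur _
    have : '+' ∉ cur.reverse := by simpa using hcur
    simp [jfwd, mySplit_no_sep '+' cur.reverse [] this]
  | cons t rest ih =>
    intro cur hcur hdone
    have ht : '+' ∉ t := hdone t (by simp)
    have hrest : ∀ u ∈ rest, '+' ∉ u := fun u hu => hdone u (by simp [hu])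
    have : jfwd (t :: rest) cur = t ++ '+' :: jfwd rest cur := by
      simp [jfwd]
    rw [this, mySplit_sep_mid '+' t (jfwd rest cur) [] ht, ih cur hcur hrest]
    simp

-- the key flattening invariant: splitting on '-' then on '+' equals splitting the '+'→'-' rewritten
-- text on '-'; done = finished '+'-pieces of the current group, cur = the reversed piece in progress
lemma mySplit_flatten : ∀ (l : List Char) (done : List (List Char)) (cur : List Char), '+' ∉ cur →
    (∀ t ∈ done, '+' ∉ t) →
    (mySplit '-' l ((jfwd done cur).reverse)).flatMap (fun t => mySplit '+' t []) =
      done ++ mySplit '-' (l.map repl) cur := by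
  intro l
  induction l with
  | nil =>
    intro done cur hcur hdone
    simp [mySplit, mySplit_plus_jfwd done cur hcur hdone]
  | cons c rest ih =>
    intro done cur hcur hdone
    by_cases hm : c = '-'
    · subst hm
      simp only [mySplit, List.map_cons, List.reverse_reverse, repl,
        if_neg (by decide : ¬ ('-' : Char) = '+'), if_true]
      rw [List.flatMap_cons, mySplit_plus_jfwd done cur hcur hdone]
      have h0 : (jfwd ([] : List (List Char)) ([] : List Char)).reverse = [] := by simp [jfwd]
      have := ih [] [] (by simp) (by simp)
      rw [h0] at this
      simp [this]
    · by_cases hp : c = '+'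
      · subst hp
        have hpush : '+' :: (jfwd done cur).reverse = (jfwd (done ++ [cur.reverse]) []).reverse := by
          simp [jfwd]
        have hdone' : ∀ t ∈ done ++ [cur.reverse], '+' ∉ t := by
          intro t ht
          rcases List.mem_append.mp ht with h | h
          · exact hdone t h
          · simp at h; subst h; simpa using hcur
        simp only [mySplit, if_neg (by decide : ¬ ('+' : Char) = '-'), List.map_cons, repl]
        rw [hpush, ih (done ++ [cur.reverse]) [] (by simp) hdone']
        simp
      · have hpush : c :: (jfwd done cur).reverse = (jfwd done (c :: cur)).reverse := by
          simp [jfwd]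
        have hcur' : '+' ∉ c :: cur := by simp [hcur]; exact fun h => hp h.symm
        simp only [mySplit, if_neg hm, List.map_cons, repl, if_neg hp]
        rw [hpush, ih done (c :: cur) hcur' hdone]

lemma flatten_main (l : List Char) :
    (mySplit '-' l []).flatMap (fun t => mySplit '+' t []) = mySplit '-' (l.map repl) [] := by
  have := mySplit_flatten l [] [] (by simp) (by simp)
  simpa [jfwd] using this

-- string-level split on the one-character separators used here
lemma pySplit_eq (s : String) (c : Char) (sep : String) (hsep : sep.toList = [c]) :
    pySplit s sep = (mySplit c s.toList []).map String.ofList := by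
  simp [pySplit, PySem.Str.split?, PySem.Chars.split?, hsep, splitOn_eq]

-- the tail of A's loop (indices ≥ 1) only ever subtracts
lemma minexp_foldl_tail (f : String → Int) (l : List String) (s : Int) (hs : 1 ≤ s) (init : Int) :
    (PySem.List.enumerate l s).foldl
      (fun total p => if p.1 == 0 then total + f p.2 else total - f p.2) init
    = init - (l.map f).sum := by
  induction l generalizing s init with
  | nil => simp [PySem.List.enumerate]
  | cons x xs ih =>
    rw [PySem.List.enumerate_cons]
    simp only [List.foldl_cons]
    have hne : (s == 0) = false := by
      simp only [beq_eq_false_iff_ne]; omega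
    simp only [hne, Bool.false_eq_true, if_false]
    rw [ih (s + 1) (by omega)]
    simp only [List.map_cons, List.sum_cons]
    ring

lemma minexp_sum_flatMap (f : List Char → Int) (g : List Char → List (List Char)) (l : List (List Char)) :
    ((l.flatMap g).map f).sum = (l.map (fun t => ((g t).map f).sum)).sum := by
  induction l with
  | nil => simp
  | cons x xs ih => simp [List.flatMap_cons, ih]

-- the sum of the int() values of one group's '+'-pieces, on the character level
def groupSum (t : List Char) : Int := ((mySplit '+' t []).map (fun u => (PySem.Int.ofChars? u).getD 0)).sum

lemma pySum_ofList (t : List Char) :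
    ((pySplit (String.ofList t) "+").map pyInt).sum = groupSum t := by
  rw [pySplit_eq (String.ofList t) '+' "+" (by decide)]
  simp [pyInt, PySem.Int.ofStr?, groupSum, Function.comp_def]

-- ===== VERDICT (by name: the statement is the Claim_ definition above) =====
theorem minimize_expression_spec : Claim_equal_minimize_expression := by
  intro expression _ _
  unfold Spec_minimize_expression minimize_expression minimize_expression_alt
  have hsplit : pySplit expression "-" = (mySplit '-' expression.toList []).map String.ofList :=
    pySplit_eq expression '-' "-" (by decide)
  have hgrand : pySplit (PySem.Str.replace expression "+" "-") "-"
      = (mySplit '-' (expression.toList.map repl) []).map String.ofList := by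
    rw [pySplit_eq _ '-' "-" (by decide), PySem.Str.toList_replace]
    have : ("+" : String).toList = ['+'] := by decide
    rw [this]
    have : ("-" : String).toList = ['-'] := by decide
    rw [this, replace_eq_map]
  cases hts : mySplit '-' expression.toList [] with
  | nil => exact absurd hts (mySplit_ne_nil '-' expression.toList [])
  | cons h rest =>
    rw [hts] at hsplit
    simp only [hsplit, List.map_cons]
    -- A's side
    rw [PySem.List.enumerate_cons]
    simp only [List.foldl_cons]
    have h0 : ((0 : Int) == 0) = true := by decide
    rw [h0]
    simp only [if_true]
    norm_num only
    rw [minexp_foldl_tail (fun t => ((pySplit t "+").map pyInt).sum) (rest.map String.ofList) 1 le_rfl]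
    -- B's side
    rw [hgrand, ← flatten_main, hts]
    simp only [List.flatMap_cons]
    have hmap : ∀ (ts : List (List Char)),
        ((ts.map String.ofList).map (fun t => ((pySplit t "+").map pyInt).sum)).sum
          = (ts.map groupSum).sum := by
      intro ts
      rw [List.map_map]
      congr 1
      apply List.map_congr_left
      intro t _
      exact pySum_ofList t
    have hflat : (((mySplit '+' h [] ++ rest.flatMap fun t => mySplit '+' t []).map String.ofList).map pyInt).sum
        = groupSum h + (rest.map groupSum).sum := by
      simp only [List.map_map, Function.comp_def, pyInt, PySem.Int.ofStr?, String.toList_ofList,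
        List.map_append, List.sum_append]
      rw [minexp_sum_flatMap (fun u => (PySem.Int.ofChars? u).getD 0) (fun t => mySplit '+' t []) rest]
      rfl
    rw [hflat, pySum_ofList h, hmap rest]
    ring
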